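-- pv_equiv track=rewrite | github.com/scvince1/Vincent_AI_DevLand | 80_Knowledge/86_AI_Systems/digest_pipeline/normalize_jsonl.py | filter_intermediate_assistant_turns
-- ===== SOURCE A (Python) =====
-- def content_line_count(text: str) -> int:
--     """Count non-empty lines in text."""
--     return sum(1 for ln in text.split("\n") if ln.strip())
--
-- def filter_intermediate_assistant_turns(turns: list[tuple[str, str]]) -> list[tuple[str, str]]:
--     """Remove short intermediate assistant turns from consecutive assistant sequences.
--
--     In a run of consecutive assistant turns (no user turn in between):
--     - Keep turns with > 3 non-empty content lines
--     - Keep the last turn in the run (even if short)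
--     - Drop short turns (<=3 lines) that are followed by another assistant turn
--     """
--     result = []
--     n = len(turns)
--     for i, (role, text) in enumerate(turns):
--         if role != "assistant":
--             result.append((role, text))
--             continue
--
--         # Check if next turn is also assistant
--         next_is_assistant = (i + 1 < n) and (turns[i + 1][0] == "assistant")
--
--         if next_is_assistant and content_line_count(text) <= 3:
--             # Short intermediate turn followed by another assistant turn -> drop
--             continue
--
--         result.append((role, text))
--
--     return result
-- ===== SOURCE B (Python) =====
-- def content_line_count(text: str) -> int:
--     """Count non-empty lines in text."""
--     return sum(1 for ln in text.split("\n") if ln.strip())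
--
--
-- def filter_intermediate_assistant_turns(turns: list[tuple[str, str]]) -> list[tuple[str, str]]:
--     """Run-based rewrite: split into maximal assistant runs; within a run keep
--     long turns plus (always) the run's last turn; other turns pass unchanged."""
--     result = []
--     i = 0
--     n = len(turns)
--     while i < n:
--         if turns[i][0] != "assistant":
--             result.append(turns[i])
--             i += 1
--             continue
--         j = i
--         while j < n and turns[j][0] == "assistant":
--             j += 1
--         run = turns[i:j]
--         result.extend(t for t in run[:-1] if content_line_count(t[1]) > 3)
--         result.append(run[-1])
--         i = j
--     return result
-- ===== Notes on version B (the rewrite author's own statement) =====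
-- stated objective: alternative
-- what changed: Replaced the per-index lookahead filter (enumerate + turns[i+1] peek) by a run-based decomposition: scan to the end of each maximal consecutive assistant run, keep its long turns plus unconditionally its last turn, and pass non-assistant turns through.
import Mathlib
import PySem

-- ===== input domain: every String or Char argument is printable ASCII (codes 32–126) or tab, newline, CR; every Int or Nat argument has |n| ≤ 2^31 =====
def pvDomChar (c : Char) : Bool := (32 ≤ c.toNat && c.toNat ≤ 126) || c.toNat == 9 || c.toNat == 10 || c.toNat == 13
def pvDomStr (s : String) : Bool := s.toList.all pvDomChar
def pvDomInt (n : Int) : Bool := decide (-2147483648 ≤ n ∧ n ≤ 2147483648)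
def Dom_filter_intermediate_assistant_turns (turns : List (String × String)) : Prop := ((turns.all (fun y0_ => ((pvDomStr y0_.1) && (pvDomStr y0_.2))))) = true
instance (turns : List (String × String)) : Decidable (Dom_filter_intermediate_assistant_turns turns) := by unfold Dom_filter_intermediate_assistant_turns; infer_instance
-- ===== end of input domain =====

-- B is a run-based re-decomposition of A's index-lookahead filter: split into maximal
-- assistant runs and keep long turns plus each run's last turn (objective: alternative).

-- ===== PORT A =====
-- content_line_count: sum(1 for ln in text.split("\n") if ln.strip());
-- split? is none only for an empty separator, so getD [] is exact here
def pvClc (text : String) : Int :=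
  ((PySem.Str.split? text "\n").getD []).foldl
    (fun s ln => if PySem.Str.strip ln ≠ "" then s + 1 else s) 0

def filter_intermediate_assistant_turns (turns : List (String × String)) : List (String × String) :=
  let n : Int := turns.length
  (PySem.List.enumerate turns).foldl
    (fun result p =>
      let i := p.1
      let role := p.2.1
      let text := p.2.2
      if role ≠ "assistant" then result ++ [(role, text)]
      else
        let next_is_assistant :=
          decide (i + 1 < n) &&
            ((PySem.List.pyGet? turns (i + 1)).elim false (fun t => t.1 == "assistant"))
        if next_is_assistant && decide (pvClc text ≤ 3) then result
        else result ++ [(role, text)])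
    []

-- ===== PORT B =====
def pvIsAssistant (t : String × String) : Bool := t.1 == "assistant"

-- run[-1] in Source B is total (the run is nonempty); ported as getLast?.toList, exact here.
def filter_intermediate_assistant_turns_alt : List (String × String) → List (String × String)
  | [] => []
  | t :: rest =>
    if h : pvIsAssistant t then
      let run := (t :: rest).takeWhile pvIsAssistant
      ((run.dropLast.filter (fun u => 3 < pvClc u.2)) ++ run.getLast?.toList)
        ++ filter_intermediate_assistant_turns_alt ((t :: rest).dropWhile pvIsAssistant)
    else t :: filter_intermediate_assistant_turns_alt rest
termination_by turns => turns.length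
decreasing_by
  · have := List.length_dropWhile_le pvIsAssistant rest
    simp [h]; omega
  · simp

-- ===== PRECONDITION & SPEC =====
def Spec_filter_intermediate_assistant_turns (turns : List (String × String)) (out : List (String × String)) : Prop := out = filter_intermediate_assistant_turns_alt turns
instance (turns : List (String × String)) (out : List (String × String)) : Decidable (Spec_filter_intermediate_assistant_turns turns out) := by unfold Spec_filter_intermediate_assistant_turns; infer_instance

-- ===== CLAIM (what is proved, stated in full; the proofs are below) =====
def Claim_equal_filter_intermediate_assistant_turns : Prop := ∀ (turns : List (String × String)), Dom_filter_intermediate_assistant_turns turns → Spec_filter_intermediate_assistant_turns turns (filter_intermediate_assistant_turns turns)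

-- ===== LEMMAS AND PROOFS =====

-- does the list start with an assistant turn?
def pvHeadAssist : List (String × String) → Bool
  | [] => false
  | u :: _ => u.1 == "assistant"

-- per-element characterisation of A: drop a turn iff it is an assistant turn,
-- the next turn is an assistant turn, and it has ≤ 3 content lines.
def pvSpecA : List (String × String) → List (String × String)
  | [] => []
  | t :: rest =>
    (if t.1 == "assistant" && pvHeadAssist rest && decide (pvClc t.2 ≤ 3)
     then ([] : List (String × String)) else [t]) ++ pvSpecA rest

lemma pvFoldA (turns : List (String × String)) :
    ∀ (post pre acc : List (String × String)), turns = pre ++ post →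
    (PySem.List.enumerate post (pre.length : Int)).foldl
      (fun result p =>
        let i := p.1
        let role := p.2.1
        let text := p.2.2
        if role ≠ "assistant" then result ++ [(role, text)]
        else
          let next_is_assistant :=
            decide (i + 1 < (turns.length : Int)) &&
              ((PySem.List.pyGet? turns (i + 1)).elim false (fun t => t.1 == "assistant"))
          if next_is_assistant && decide (pvClc text ≤ 3) then result
          else result ++ [(role, text)]) acc
    = acc ++ pvSpecA post := by
  intro post
  induction post with
  | nil => intro pre acc h; simp [PySem.List.enumerate_nil, pvSpecA]
  | cons t tail ih =>
    intro pre acc h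
    rw [PySem.List.enumerate_cons, List.foldl_cons]
    have hstep : (let i := (((pre.length : Int)), t).1
        let role := (((pre.length : Int)), t).2.1
        let text := (((pre.length : Int)), t).2.2
        if role ≠ "assistant" then acc ++ [(role, text)]
        else
          let next_is_assistant :=
            decide (i + 1 < (turns.length : Int)) &&
              ((PySem.List.pyGet? turns (i + 1)).elim false (fun t => t.1 == "assistant"))
          if next_is_assistant && decide (pvClc text ≤ 3) then acc
          else acc ++ [(role, text)])
        = acc ++ (if t.1 == "assistant" && pvHeadAssist tail && decide (pvClc t.2 ≤ 3)
                  then ([] : List (String × String)) else [t]) := by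
      simp only []
      obtain ⟨r, x⟩ := t
      by_cases hr : r = "assistant"
      · subst hr
        have hget : PySem.List.pyGet? turns ((pre.length : Int) + 1) = tail[0]? := by
          subst h
          have := PySem.List.pyGet?_append_right pre (("assistant", x) :: tail) 1
          simpa using this
        have hlen : (turns.length : Int) = pre.length + 1 + tail.length := by
          subst h; simp; ring
        cases tail with
        | nil => simp [hget, hlen, pvHeadAssist]
        | cons u tl =>
          by_cases hu : (u.1 == "assistant")
          · by_cases hc : pvClc x ≤ 3 <;>
              simp [hget, hlen, pvHeadAssist, hu, hc]
          · simp at hu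
            simp [hget, hlen, pvHeadAssist, hu]
      · have hne : (r == "assistant") = false := by simpa using hr
        simp [hr, hne]
    rw [hstep]
    have hcast : (pre.length : Int) + 1 = ((pre ++ [t]).length : Int) := by simp
    rw [hcast, ih (pre ++ [t]) _ (by rw [h]; simp)]
    show _ = acc ++ pvSpecA (t :: tail)
    rw [show pvSpecA (t :: tail) = (if t.1 == "assistant" && pvHeadAssist tail
          && decide (pvClc t.2 ≤ 3) then ([] : List (String × String)) else [t])
          ++ pvSpecA tail from rfl]
    rw [List.append_assoc]

lemma pvA_eq_specA (turns : List (String × String)) :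
    filter_intermediate_assistant_turns turns = pvSpecA turns := by
  have := pvFoldA turns turns [] [] rfl
  simpa [filter_intermediate_assistant_turns] using this

lemma pvHeadAssist_dropWhile (l : List (String × String)) :
    pvHeadAssist (l.dropWhile pvIsAssistant) = false := by
  induction l with
  | nil => rfl
  | cons x xs ih =>
    rw [List.dropWhile_cons]
    by_cases h : pvIsAssistant x
    · simp [h, ih]
    · simp [h, pvHeadAssist]
      simpa [pvIsAssistant] using h

lemma pvSpecA_run :
    ∀ (run rest : List (String × String)), run ≠ [] →
      (∀ u ∈ run, u.1 == "assistant") → pvHeadAssist rest = false →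
      pvSpecA (run ++ rest)
        = (run.dropLast.filter (fun u => !decide (pvClc u.2 ≤ 3)) ++ run.getLast?.toList)
            ++ pvSpecA rest := by
  intro run
  induction run with
  | nil => intro rest h; exact absurd rfl h
  | cons a run' ih =>
    intro rest _ hall hrest
    cases run' with
    | nil => simp [pvSpecA, hrest]
    | cons b run'' =>
      have ha : a.1 == "assistant" := hall a (by simp)
      have hb : b.1 == "assistant" := hall b (by simp)
      have hrec := ih rest (by simp) (fun u hu => hall u (by simp [hu])) hrest
      have step : ∀ (x : String × String) (l : List (String × String)),
          pvSpecA (x :: l) = (if x.1 == "assistant" && pvHeadAssist l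
            && decide (pvClc x.2 ≤ 3) then ([] : List (String × String)) else [x])
            ++ pvSpecA l := fun x l => rfl
      have hh : pvHeadAssist (b :: (run'' ++ rest)) = true := by simp [pvHeadAssist, hb]
      calc pvSpecA (a :: b :: run'' ++ rest)
          = (if a.1 == "assistant" && pvHeadAssist (b :: (run'' ++ rest))
              && decide (pvClc a.2 ≤ 3) then ([] : List (String × String)) else [a])
              ++ pvSpecA ((b :: run'') ++ rest) := step a (b :: (run'' ++ rest))
        _ = _ := by
              rw [hrec, hh, ha]
              by_cases hc : pvClc a.2 ≤ 3 <;>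
                simp [hc, List.dropLast_cons₂, List.getLast?_cons_cons]

lemma pvB_eq_specA : ∀ (n : Nat) (turns : List (String × String)), turns.length ≤ n →
    filter_intermediate_assistant_turns_alt turns = pvSpecA turns := by
  intro n
  induction n with
  | zero =>
    intro turns h
    have : turns = [] := List.eq_nil_of_length_eq_zero (Nat.le_zero.mp h)
    subst this
    simp [filter_intermediate_assistant_turns_alt, pvSpecA]
  | succ n ih =>
    intro turns h
    cases turns with
    | nil => simp [filter_intermediate_assistant_turns_alt, pvSpecA]
    | cons t rest =>
      rw [filter_intermediate_assistant_turns_alt]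
      by_cases ht : pvIsAssistant t
      · simp only [ht, dif_pos]
        have hdrop : (t :: rest).dropWhile pvIsAssistant = rest.dropWhile pvIsAssistant := by
          simp [List.dropWhile_cons, ht]
        have hlen : (rest.dropWhile pvIsAssistant).length ≤ n := by
          have := List.length_dropWhile_le pvIsAssistant rest
          simp at h; omega
        rw [hdrop, ih _ hlen]
        have hsplit : (t :: rest) = ((t :: rest).takeWhile pvIsAssistant)
            ++ ((t :: rest).dropWhile pvIsAssistant) := (List.takeWhile_append_dropWhile).symm
        rw [show pvSpecA (t :: rest) = pvSpecA (((t :: rest).takeWhile pvIsAssistant)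
            ++ ((t :: rest).dropWhile pvIsAssistant)) from by rw [← hsplit]]
        rw [pvSpecA_run _ _ (by simp [ht])
              (fun u hu => by
                have := List.mem_takeWhile_imp hu
                simpa [pvIsAssistant] using this)
              (pvHeadAssist_dropWhile _)]
        rw [hdrop]
        congr 2
        apply List.filter_congr
        intro u _
        by_cases hc : pvClc u.2 ≤ 3 <;> simp [hc] <;> omega
      · simp only [ht, Bool.false_eq_true, dite_false]
        have hne : (t.1 == "assistant") = false := by
          simp only [pvIsAssistant] at ht; simpa using ht
        rw [ih rest (by simp at h; omega)]
        show t :: pvSpecA rest = pvSpecA (t :: rest)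
        rw [show pvSpecA (t :: rest) = (if t.1 == "assistant" && pvHeadAssist rest
              && decide (pvClc t.2 ≤ 3) then ([] : List (String × String)) else [t])
              ++ pvSpecA rest from rfl]
        simp [hne]

-- ===== VERDICT (by name: the statement is the Claim_ definition above) =====
theorem filter_intermediate_assistant_turns_spec : Claim_equal_filter_intermediate_assistant_turns := by
  intro turns _
  unfold Spec_filter_intermediate_assistant_turns
  rw [pvA_eq_specA, pvB_eq_specA turns.length turns (le_refl _)]
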